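-- pv_equiv track=rewrite | github.com/HardM00N/BOJ | 프로그래머스/Lv. 1/대충 만든 자판.py | make_keydict
-- ===== SOURCE A (Python) =====
-- def make_keydict(keymap):                   # keymap에서 문자마다 필요한 최소횟수를 저장하는 딕셔너리 생성
--     keydict = {}
--
--     for key in keymap:
--         for i, k in enumerate(key):
--             if k in keydict:                # 딕셔너리에 이미 문자 k가 있다면
--                 if i + 1 < keydict[k]:      # 더 작은 횟수 (최소횟수)를 딕셔너리에 저장
--                     keydict[k] = i + 1
--             else:                           # 딕셔너리에 문자 k가 없었다면 추가
--                 keydict[k] = i + 1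
--
--     return keydict
-- ===== SOURCE B (Python) =====
-- def make_keydict(keymap):
--     # flatten, group positions per character, then reduce each group with min
--     pairs = [(k, i + 1) for key in keymap for i, k in enumerate(key)]
--     table = {}
--     for k, n in pairs:
--         table.setdefault(k, []).append(n)
--     return {k: min(ns) for k, ns in table.items()}
-- ===== Notes on version B (the rewrite author's own statement) =====
-- stated objective: alternative
-- what changed: A keeps a running minimum in one conditional-update dict pass over nested loops; B flattens to (char, position) pairs, groups all positions per character into lists, and then reduces each group with min in a separate comprehension pass.
import Mathlib
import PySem

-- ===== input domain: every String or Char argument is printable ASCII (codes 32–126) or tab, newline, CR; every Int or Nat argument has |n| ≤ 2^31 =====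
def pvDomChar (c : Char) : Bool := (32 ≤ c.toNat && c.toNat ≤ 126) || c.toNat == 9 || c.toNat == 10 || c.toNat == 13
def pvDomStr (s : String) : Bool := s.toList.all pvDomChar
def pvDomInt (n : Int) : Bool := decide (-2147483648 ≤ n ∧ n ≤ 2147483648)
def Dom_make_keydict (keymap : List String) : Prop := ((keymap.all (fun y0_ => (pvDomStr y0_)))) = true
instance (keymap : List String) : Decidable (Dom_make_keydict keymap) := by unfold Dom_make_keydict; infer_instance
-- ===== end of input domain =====

-- B flattens to (char, position) pairs, groups positions per character, then reduces each group with min,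
-- instead of A's running-minimum conditional-update dict; objective: alternative decomposition, same cost.

-- ===== PORT A =====
-- literal port of A: nested loops, conditional minimum update in the dict
def make_keydict (keymap : List String) : List (String × Int) :=
  let keydict : PySem.Dict String Int :=
    keymap.foldl (fun keydict key =>
      (PySem.List.enumerate key.toList 0).foldl (fun keydict ik =>
        let k : String := String.ofList [ik.2]
        if keydict.contains k then
          (if ik.1 + 1 < keydict.getD k 0 then keydict.insert k (ik.1 + 1) else keydict)
        else keydict.insert k (ik.1 + 1)) keydict)
      PySem.Dict.empty
  keydict.items

-- ===== PORT B =====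
-- literal port of B (Source B): flatten to pairs, group into lists, reduce each group with min.
-- min(ns): ns is never empty here, so the `none` fallback 0 is unreachable (Python's min would raise on []).
def make_keydict_alt (keymap : List String) : List (String × Int) :=
  let pairs : List (String × Int) :=
    keymap.flatMap (fun key =>
      (PySem.List.enumerate key.toList 0).map (fun ik => (String.ofList [ik.2], ik.1 + 1)))
  let table : PySem.Dict String (List Int) :=
    pairs.foldl (fun d p => d.modify p.1 [] (· ++ [p.2])) PySem.Dict.empty
  table.items.map (fun p =>
    (p.1, match PySem.List.min? p.2 (fun x => x) with | some m => m | none => 0))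

-- ===== PRECONDITION & SPEC =====
def Spec_make_keydict (keymap : List String) (out : List (String × Int)) : Prop := out = make_keydict_alt keymap
instance (keymap : List String) (out : List (String × Int)) : Decidable (Spec_make_keydict keymap out) := by unfold Spec_make_keydict; infer_instance

-- ===== CLAIM (what is proved, stated in full; the proofs are below) =====
def Claim_equal_make_keydict : Prop := ∀ (keymap : List String), Dom_make_keydict keymap → Spec_make_keydict keymap (make_keydict keymap)

-- ===== LEMMAS AND PROOFS =====

-- the flattened (char, position) stream both programs process
def pvPairs (keymap : List String) : List (String × Int) :=
  keymap.flatMap (fun key =>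
    (PySem.List.enumerate key.toList 0).map (fun ik => (String.ofList [ik.2], ik.1 + 1)))

-- A's per-pair step
def stepA (d : PySem.Dict String Int) (p : String × Int) : PySem.Dict String Int :=
  if d.contains p.1 then
    (if p.2 < d.getD p.1 0 then d.insert p.1 p.2 else d)
  else d.insert p.1 p.2

def minStep (o : Option Int) (n : Int) : Option Int :=
  match o with
  | none => some n
  | some a => some (if n < a then n else a)

lemma make_keydict_eq_pairs (keymap : List String) :
    make_keydict keymap = ((pvPairs keymap).foldl stepA PySem.Dict.empty).items := by
  unfold make_keydict pvPairs
  dsimp only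
  rw [List.flatMap_def, List.foldl_flatten, List.foldl_map]
  have hfun : (fun (keydict : PySem.Dict String Int) (key : String) =>
      (PySem.List.enumerate key.toList).foldl (fun keydict ik =>
        if keydict.contains (String.ofList [ik.2]) = true then
          (if ik.1 + 1 < keydict.getD (String.ofList [ik.2]) 0 then
            keydict.insert (String.ofList [ik.2]) (ik.1 + 1) else keydict)
        else keydict.insert (String.ofList [ik.2]) (ik.1 + 1)) keydict)
      = (fun (x : PySem.Dict String Int) (y : String) =>
          List.foldl stepA x ((PySem.List.enumerate y.toList).map
            (fun ik => (String.ofList [ik.2], ik.1 + 1)))) := by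
    funext d key
    rw [List.foldl_map]
    rfl
  rw [hfun]

lemma get?_foldl_stepA (l : List (String × Int)) (d : PySem.Dict String Int) (c : String) :
    (l.foldl stepA d).get? c
      = ((l.filter (fun p => p.1 == c)).map (·.2)).foldl minStep (d.get? c) := by
  induction l generalizing d with
  | nil => rfl
  | cons p t ih =>
    rw [List.foldl_cons, ih]
    by_cases hc : p.1 = c
    · subst hc
      simp only [List.filter_cons, beq_self_eq_true, if_pos, List.map_cons, List.foldl_cons]
      congr 1
      unfold stepA
      by_cases h : d.contains p.1 = true
      · obtain ⟨a, ha⟩ : ∃ a, d.get? p.1 = some a := by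
          rcases ho : d.get? p.1 with _ | a
          · rw [PySem.Dict.contains_eq_isSome_get?, ho] at h; simp at h
          · exact ⟨a, rfl⟩
        rw [h, if_pos rfl, PySem.Dict.getD_of_get?_eq_some d (0 : Int) ha, ha]
        by_cases hlt : p.2 < a
        · simp [hlt, PySem.Dict.get?_insert_self, minStep]
        · simp [hlt, ha, minStep]
      · simp only [h, Bool.false_eq_true, if_neg, not_false_iff]
        rw [PySem.Dict.get?_insert_self]
        have : d.get? p.1 = none := by
          rw [PySem.Dict.contains_eq_isSome_get?] at h
          rcases ho : d.get? p.1 with _ | a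
          · rfl
          · rw [ho] at h; simp at h
        rw [this]; rfl
    · have hb : (p.1 == c) = false := beq_eq_false_iff_ne.mpr hc
      simp only [List.filter_cons, hb, Bool.false_eq_true, if_neg, not_false_iff]
      congr 1
      unfold stepA
      split_ifs <;> simp [PySem.Dict.get?_insert_of_ne _ _ (Ne.symm hc)]

lemma keys_foldl_stepA (l : List (String × Int)) (d : PySem.Dict String Int) :
    (l.foldl stepA d).keys = PySem.Set.update d.keys (l.map (·.1)) := by
  induction l generalizing d with
  | nil => simp [PySem.Set.update]
  | cons p t ih =>
    rw [List.foldl_cons, ih, List.map_cons, PySem.Set.update_cons]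
    congr 1
    unfold stepA
    by_cases h : d.contains p.1 = true
    · have hm : p.1 ∈ d.keys := (PySem.Dict.contains_iff_mem_keys d p.1).mp h
      rw [if_pos h, PySem.Set.add_of_mem hm]
      split_ifs with hlt
      · rw [PySem.Dict.keys_insert_of_contains d _ h]
      · rfl
    · have hm : p.1 ∉ d.keys := fun hmem => h ((PySem.Dict.contains_iff_mem_keys d p.1).mpr hmem)
      rw [if_neg h, PySem.Set.add_of_not_mem hm,
        PySem.Dict.keys_insert_of_not_contains d _ (by simpa using h)]

lemma foldl_minStep_some (t : List Int) (a : Int) :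
    t.foldl minStep (some a) = some (t.foldl min a) := by
  induction t generalizing a with
  | nil => rfl
  | cons n t ih =>
    rw [List.foldl_cons, List.foldl_cons]
    have hstep : minStep (some a) n = some (min a n) := by
      have hval : (if n < a then n else a) = min a n := by
        rw [min_def]
        split_ifs <;> omega
      show some (if n < a then n else a) = some (min a n)
      rw [hval]
    rw [hstep, ih]

lemma nodup_keys_foldl_stepA (l : List (String × Int)) :
    (l.foldl stepA PySem.Dict.empty).keys.Nodup := by
  rw [keys_foldl_stepA]
  simp only [PySem.Dict.keys_empty, PySem.Set.update_nil_left]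
  exact PySem.Set.nodup_ofList _

-- ===== VERDICT (by name: the statement is the Claim_ definition above) =====
theorem make_keydict_spec : Claim_equal_make_keydict := by
  intro keymap _
  unfold Spec_make_keydict
  have haltB : make_keydict_alt keymap
      = ((pvPairs keymap).foldl (fun d p => d.modify p.1 [] (· ++ [p.2])) PySem.Dict.empty).items.map
          (fun p => (p.1, match PySem.List.min? p.2 (fun x => x) with | some m => m | none => 0)) := rfl
  rw [make_keydict_eq_pairs, haltB]
  set pairs := pvPairs keymap with hpairs
  have hkeysB :
      (pairs.foldl (fun d p => d.modify p.1 [] (· ++ [p.2])) PySem.Dict.empty).keys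
        = PySem.Set.ofList (pairs.map (·.1)) := by
    rw [PySem.Dict.keys_foldl_modify_key pairs (·.1) ([] : List Int) (fun _ p => (· ++ [p.2]))]
    simp [PySem.Set.update_nil_left]
  have hnodB :
      (pairs.foldl (fun d p => d.modify p.1 [] (· ++ [p.2])) PySem.Dict.empty).keys.Nodup := by
    rw [hkeysB]; exact PySem.Set.nodup_ofList _
  rw [PySem.Dict.items_eq_map_keys _ hnodB ([] : List Int),
      PySem.Dict.items_eq_map_keys _ (nodup_keys_foldl_stepA pairs) (0 : Int),
      keys_foldl_stepA, hkeysB]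
  simp only [PySem.Dict.keys_empty, PySem.Set.update_nil_left, List.map_map]
  apply List.map_congr_left
  intro c hc
  have hcmem : c ∈ pairs.map (·.1) := (PySem.Set.mem_ofList _ _).mp hc
  obtain ⟨p0, hp0, hp0c⟩ := List.mem_map.mp hcmem
  have hfil : p0 ∈ pairs.filter (fun p => p.1 == c) := by
    rw [List.mem_filter]
    exact ⟨hp0, by simp [hp0c]⟩
  simp only [Function.comp]
  rw [PySem.Dict.getD_eq_get?_getD, get?_foldl_stepA,
      PySem.Dict.getD_foldl_modify_append, PySem.Dict.getD_empty, PySem.Dict.get?_empty]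
  rcases hps : (pairs.filter (fun p => p.1 == c)).map (·.2) with _ | ⟨h0, t⟩
  · exfalso
    have : p0.2 ∈ (pairs.filter (fun p => p.1 == c)).map (·.2) := List.mem_map_of_mem hfil
    rw [hps] at this; exact absurd this (List.not_mem_nil)
  · rw [List.nil_append, hps, List.foldl_cons]
    have h1 : minStep none h0 = some h0 := rfl
    rw [h1, foldl_minStep_some, PySem.List.min?_id_cons]
    simp
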